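-- pv_equiv track=rewrite | github.com/Jome0169/Mendieta.C4_manuscript | python_scripts/marker_scripts/process_markers.annotate_v3.py | generate_compressed_marker_list
-- ===== SOURCE A (Python) =====
-- def generate_compressed_marker_list(lines_to_split, collapse_dict):
--     """TODO: Docstring for generate_compressed_marker_list.
--     :returns: TODO
--
--     """
--     gathered_collapsed_markers = []
--     for item in lines_to_split:
--         comm_count = item[-1].count(',')
--
--         if comm_count >= 1:
--             take_base_list = item[0:5]
--             split_comma = item[-1].split(',')
--             for cell_type in split_comma:
--                 if cell_type in collapse_dict:
--                     grab_new_name = collapse_dict[cell_type]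
--                     final_list = take_base_list + [grab_new_name]
--                     gathered_collapsed_markers.append(final_list)
--                 elif cell_type not in collapse_dict:
--                     final_list = take_base_list + [cell_type]
--                     gathered_collapsed_markers.append(final_list)
--
--         elif comm_count == 0:
--             cell_type = item[-1]
--             take_base_list = item[0:5]
--             if cell_type in collapse_dict:
--                 grab_new_name = collapse_dict[cell_type]
--                 final_list = take_base_list + [grab_new_name]
--                 gathered_collapsed_markers.append(final_list)
--             elif cell_type not in collapse_dict:
--                 final_list = take_base_list + [cell_type]
--                 gathered_collapsed_markers.append(final_list)
--
--     unique_collapsed_only = []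
--
--     for item in gathered_collapsed_markers:
--         if item not in unique_collapsed_only:
--             unique_collapsed_only.append(item)
--
--     return(unique_collapsed_only)
-- ===== SOURCE B (Python) =====
-- def generate_compressed_marker_list(lines_to_split, collapse_dict):
--     """Single streaming pass: expand each line's comma-separated cell types and
--     deduplicate on the fly with a seen-set (first occurrence kept, in order)."""
--     result = []
--     seen = set()
--     for item in lines_to_split:
--         base = item[0:5]
--         for cell_type in item[-1].split(','):
--             row = base + [collapse_dict.get(cell_type, cell_type)]
--             key = tuple(row)
--             if key not in seen:
--                 seen.add(key)
--                 result.append(row)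
--     return result
-- ===== Notes on version B (the rewrite author's own statement) =====
-- stated objective: alternative
-- what changed: B fuses A's two phases (expand all rows, then a quadratic list-membership dedup pass) into one streaming pass that drops the comm_count branch (split handles the no-comma case identically) and deduplicates on the fly with a hash set of already-emitted rows, so the second scanning loop disappears.
import Mathlib
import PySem

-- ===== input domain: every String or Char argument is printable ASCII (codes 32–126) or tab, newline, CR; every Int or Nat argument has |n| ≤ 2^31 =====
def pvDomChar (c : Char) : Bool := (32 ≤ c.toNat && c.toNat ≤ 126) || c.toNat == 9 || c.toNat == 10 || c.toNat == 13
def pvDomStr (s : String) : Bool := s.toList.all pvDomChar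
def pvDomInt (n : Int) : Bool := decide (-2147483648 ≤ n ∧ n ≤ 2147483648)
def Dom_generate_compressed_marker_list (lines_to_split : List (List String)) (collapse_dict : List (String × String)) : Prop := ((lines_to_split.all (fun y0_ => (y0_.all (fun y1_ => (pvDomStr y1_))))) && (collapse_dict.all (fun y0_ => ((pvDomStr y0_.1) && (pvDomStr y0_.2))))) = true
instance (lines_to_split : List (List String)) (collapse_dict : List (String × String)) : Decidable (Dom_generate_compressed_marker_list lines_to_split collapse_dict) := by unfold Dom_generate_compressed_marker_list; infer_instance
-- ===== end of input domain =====

-- B fuses A's expand-then-dedup phases into one streaming pass with a seen-set (alternative decomposition); equivalence of the return values is proved on inputs whose rows are all nonempty.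

-- ===== PORT A =====
def generate_compressed_marker_list (lines_to_split : List (List String)) (collapse_dict : List (String × String)) : List (List String) :=
  let gathered_collapsed_markers := lines_to_split.foldl (fun acc item =>
    -- item[-1]: Pre_ excludes item = [] (IndexError), so the "" default is never used there
    let lastS := (PySem.List.pyGet? item (-1)).getD ""
    let comm_count := PySem.Str.count lastS ","
    if comm_count ≥ 1 then
      let take_base_list := PySem.List.slice item (some 0) (some 5)
      let split_comma := (PySem.Str.split? lastS ",").getD []
      split_comma.foldl (fun acc2 cell_type =>
        match PySem.Dict.get? (PySem.Dict.mk collapse_dict) cell_type with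
        | some grab_new_name => acc2 ++ [take_base_list ++ [grab_new_name]]
        | none => acc2 ++ [take_base_list ++ [cell_type]]) acc
    else
      let cell_type := lastS
      let take_base_list := PySem.List.slice item (some 0) (some 5)
      match PySem.Dict.get? (PySem.Dict.mk collapse_dict) cell_type with
      | some grab_new_name => acc ++ [take_base_list ++ [grab_new_name]]
      | none => acc ++ [take_base_list ++ [cell_type]]) []
  gathered_collapsed_markers.foldl (fun uniq item => if item ∈ uniq then uniq else uniq ++ [item]) []

-- ===== PORT B =====
def generate_compressed_marker_list_alt (lines_to_split : List (List String)) (collapse_dict : List (String × String)) : List (List String) :=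
  (lines_to_split.foldl (fun (st : List (List String) × PySem.Set (List String)) item =>
      let base := PySem.List.slice item (some 0) (some 5)
      ((PySem.Str.split? ((PySem.List.pyGet? item (-1)).getD "") ",").getD []).foldl
        (fun st2 cell_type =>
          let row := base ++ [(PySem.Dict.get? (PySem.Dict.mk collapse_dict) cell_type).getD cell_type]
          if PySem.Set.contains st2.2 row then st2
          else (st2.1 ++ [row], PySem.Set.add st2.2 row)) st)
    (([], PySem.Set.empty))).1

-- ===== PRECONDITION & SPEC =====
-- Pre_ excludes inputs containing an empty row: there Python's item[-1] raises IndexError in A (and in B alike).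
def Pre_generate_compressed_marker_list (lines_to_split : List (List String)) (collapse_dict : List (String × String)) : Prop :=
  ∀ item ∈ lines_to_split, item ≠ []
instance (lines_to_split : List (List String)) (collapse_dict : List (String × String)) : Decidable (Pre_generate_compressed_marker_list lines_to_split collapse_dict) := by unfold Pre_generate_compressed_marker_list; infer_instance

def pvWitness_generate_compressed_marker_list : List (List String) × (List (String × String)) :=
  ([["chr1", "100", "200", "geneA", "0.5", "X,Y"], ["chr1", "100", "200", "geneA", "0.5", "X"]], [("X", "Neuron")])

def Spec_generate_compressed_marker_list (lines_to_split : List (List String)) (collapse_dict : List (String × String)) (out : List (List String)) : Prop := out = generate_compressed_marker_list_alt lines_to_split collapse_dict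
instance (lines_to_split : List (List String)) (collapse_dict : List (String × String)) (out : List (List String)) : Decidable (Spec_generate_compressed_marker_list lines_to_split collapse_dict out) := by unfold Spec_generate_compressed_marker_list; infer_instance

-- ===== CLAIM (what is proved, stated in full; the proofs are below) =====
def Claim_equal_generate_compressed_marker_list : Prop := ∀ (lines_to_split : List (List String)) (collapse_dict : List (String × String)), Dom_generate_compressed_marker_list lines_to_split collapse_dict → Pre_generate_compressed_marker_list lines_to_split collapse_dict → Spec_generate_compressed_marker_list lines_to_split collapse_dict (generate_compressed_marker_list lines_to_split collapse_dict)

-- ===== LEMMAS AND PROOFS =====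

-- The per-item row list both programs produce (B's value per cell type).
def pvRows (collapse_dict : List (String × String)) (item : List String) : List (List String) :=
  ((PySem.Str.split? ((PySem.List.pyGet? item (-1)).getD "") ",").getD []).map
    (fun ct => PySem.List.slice item (some 0) (some 5) ++ [(PySem.Dict.get? (PySem.Dict.mk collapse_dict) ct).getD ct])

theorem pv_splitOn_go_of_not_infix (sep : List Char) :
    ∀ (fuel : Nat) (l cur : List Char) (acc : List (List Char)), ¬ sep <:+: l →
      PySem.Chars.splitOn.go sep fuel l cur acc = ((cur.reverse ++ l) :: acc).reverse := by
  intro fuel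
  induction fuel with
  | zero => intro l cur acc _; simp [PySem.Chars.splitOn.go]
  | succ n ih =>
    intro l cur acc h
    cases l with
    | nil => simp [PySem.Chars.splitOn.go]
    | cons c rest =>
      have hpre : sep.isPrefixOf (c :: rest) = false := by
        rw [Bool.eq_false_iff]
        intro hc
        exact h (List.isPrefixOf_iff_prefix.mp hc).isInfix
      have hrest : ¬ sep <:+: rest := fun hr => h (hr.trans (List.suffix_cons c rest).isInfix)
      rw [PySem.Chars.splitOn.go]
      simp only [hpre, Bool.false_eq_true, if_false]
      rw [ih rest (c :: cur) acc hrest]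
      simp

-- count.go never decreases the accumulator.
theorem pv_count_go_le (sub : List Char) :
    ∀ (fuel : Nat) (l : List Char) (acc : Nat), acc ≤ PySem.Chars.count.go sub fuel l acc := by
  intro fuel
  induction fuel with
  | zero => intro l acc; rw [PySem.Chars.count.go]
  | succ n ih =>
    intro l acc
    cases l with
    | nil =>
      rw [PySem.Chars.count.go]
      all_goals omega
    | cons c rest =>
      rw [PySem.Chars.count.go]
      by_cases hp : sub.isPrefixOf (c :: rest) = true
      · simp only [hp, if_true]
        exact le_trans (Nat.le_succ acc) (ih _ _)
      · simp only [hp]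
        exact ih _ _

-- If count.go returns its accumulator unchanged (with enough fuel), sub occurs nowhere.
theorem pv_count_go_eq_acc (sub : List Char) (hne : sub ≠ []) :
    ∀ (fuel : Nat) (l : List Char) (acc : Nat), l.length ≤ fuel →
      PySem.Chars.count.go sub fuel l acc = acc → ¬ sub <:+: l := by
  intro fuel
  induction fuel with
  | zero =>
    intro l acc hlen _
    have : l = [] := List.eq_nil_of_length_eq_zero (Nat.le_zero.mp hlen)
    subst this
    intro hinf
    exact hne (List.eq_nil_of_infix_nil hinf)
  | succ n ih =>
    intro l acc hlen hgo
    cases l with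
    | nil =>
      intro hinf
      exact hne (List.eq_nil_of_infix_nil hinf)
    | cons c rest =>
      rw [PySem.Chars.count.go] at hgo
      by_cases hp : sub.isPrefixOf (c :: rest) = true
      · exfalso
        simp only [hp, if_true] at hgo
        have := pv_count_go_le sub n (List.drop sub.length (c :: rest)) (acc + 1)
        omega
      · simp only [hp] at hgo
        have hrest : ¬ sub <:+: rest := ih rest acc (by simpa using Nat.le_of_succ_le_succ (by simpa using hlen)) hgo
        intro hinf
        rcases List.infix_cons_iff.mp hinf with hpre | htail
        · exact hp (List.isPrefixOf_iff_prefix.mpr hpre)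
        · exact hrest htail

-- Python: s.count(',') == 0 implies s.split(',') == [s].
theorem pv_split_of_count_zero (s : String) (h : PySem.Str.count s "," = 0) :
    (PySem.Str.split? s ",").getD [] = [s] := by
  have hni : ¬ (",".toList) <:+: s.toList := by
    have hc : PySem.Chars.count s.toList ",".toList = 0 := by
      simpa [PySem.Str.count] using h
    rw [PySem.Chars.count] at hc
    simp only [List.isEmpty_iff] at hc
    have : ¬ (",".toList = []) := by decide
    rw [if_neg this] at hc
    exact pv_count_go_eq_acc ",".toList (by decide) s.toList.length s.toList 0 le_rfl hc
  have hsplit : PySem.Chars.splitOn s.toList ",".toList = [s.toList] := by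
    rw [PySem.Chars.splitOn]
    rw [pv_splitOn_go_of_not_infix ",".toList (s.toList.length + 1) s.toList [] [] hni]
    simp
  simp only [PySem.Str.split?, PySem.Chars.split?]
  rw [if_neg (by decide)]
  rw [hsplit]
  simp [String.ofList_toList]

-- A's inner branch appends exactly pvRows item.
theorem pv_A_step (collapse_dict : List (String × String)) (acc : List (List String)) (item : List String) :
    (let lastS := (PySem.List.pyGet? item (-1)).getD ""
     let comm_count := PySem.Str.count lastS ","
     if comm_count ≥ 1 then
       let take_base_list := PySem.List.slice item (some 0) (some 5)
       let split_comma := (PySem.Str.split? lastS ",").getD []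
       split_comma.foldl (fun acc2 cell_type =>
         match PySem.Dict.get? (PySem.Dict.mk collapse_dict) cell_type with
         | some grab_new_name => acc2 ++ [take_base_list ++ [grab_new_name]]
         | none => acc2 ++ [take_base_list ++ [cell_type]]) acc
     else
       let cell_type := lastS
       let take_base_list := PySem.List.slice item (some 0) (some 5)
       match PySem.Dict.get? (PySem.Dict.mk collapse_dict) cell_type with
       | some grab_new_name => acc ++ [take_base_list ++ [grab_new_name]]
       | none => acc ++ [take_base_list ++ [cell_type]])
    = acc ++ pvRows collapse_dict item := by
  simp only []
  set lastS := (PySem.List.pyGet? item (-1)).getD "" with hlast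
  have hmatch : ∀ (acc2 : List (List String)) (ct : String),
      (match PySem.Dict.get? (PySem.Dict.mk collapse_dict) ct with
       | some v => acc2 ++ [PySem.List.slice item (some 0) (some 5) ++ [v]]
       | none => acc2 ++ [PySem.List.slice item (some 0) (some 5) ++ [ct]])
      = acc2 ++ [PySem.List.slice item (some 0) (some 5) ++ [(PySem.Dict.get? (PySem.Dict.mk collapse_dict) ct).getD ct]] := by
    intro acc2 ct
    cases PySem.Dict.get? (PySem.Dict.mk collapse_dict) ct <;> simp
  by_cases hcc : PySem.Str.count lastS "," ≥ 1
  · rw [if_pos hcc]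
    unfold pvRows
    rw [← hlast]
    have hfun : (fun (acc2 : List (List String)) (cell_type : String) =>
        match PySem.Dict.get? (PySem.Dict.mk collapse_dict) cell_type with
        | some grab_new_name => acc2 ++ [PySem.List.slice item (some 0) (some 5) ++ [grab_new_name]]
        | none => acc2 ++ [PySem.List.slice item (some 0) (some 5) ++ [cell_type]])
        = (fun acc2 ct => acc2 ++ [PySem.List.slice item (some 0) (some 5) ++ [(PySem.Dict.get? (PySem.Dict.mk collapse_dict) ct).getD ct]]) := by
      funext acc2 ct
      exact hmatch acc2 ct
    rw [hfun, PySem.List.foldl_append_singleton_eq_map]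
  · rw [if_neg hcc]
    have hzero : PySem.Str.count lastS "," = 0 := by omega
    unfold pvRows
    rw [← hlast, pv_split_of_count_zero lastS hzero]
    simp only [List.map_cons, List.map_nil]
    exact hmatch acc lastS

-- Streaming dedup with seen-set = naive membership dedup (the pair stays diagonal).
theorem pv_fuse (L : List (List String)) :
    ∀ (u : List (List String)),
      L.foldl (fun (st : List (List String) × PySem.Set (List String)) row =>
          if PySem.Set.contains st.2 row then st
          else (st.1 ++ [row], PySem.Set.add st.2 row)) (u, u)
      = (L.foldl (fun uniq it => if it ∈ uniq then uniq else uniq ++ [it]) u,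
         L.foldl (fun uniq it => if it ∈ uniq then uniq else uniq ++ [it]) u) := by
  induction L with
  | nil => intro u; simp
  | cons a L ih =>
    intro u
    simp only [List.foldl_cons]
    have hc : PySem.Set.contains u a = true ↔ a ∈ u := by
      simp [PySem.Set.contains]
    by_cases h : a ∈ u
    · rw [if_pos (hc.mpr h), if_pos h]
      exact ih u
    · rw [if_neg (fun hcc => h (hc.mp hcc)), if_neg h]
      have hadd : PySem.Set.add u a = u ++ [a] := by
        rw [PySem.Set.add, if_neg (fun hcc => h (hc.mp hcc))]
      rw [hadd]
      exact ih (u ++ [a])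

-- ===== VERDICT (by name: the statement is the Claim_ definition above) =====
theorem generate_compressed_marker_list_spec : Claim_equal_generate_compressed_marker_list := by
  intro lines_to_split collapse_dict _ _
  unfold Spec_generate_compressed_marker_list
  unfold generate_compressed_marker_list generate_compressed_marker_list_alt
  -- A's gathering loop appends pvRows per item
  have hA : (fun (acc : List (List String)) (item : List String) =>
      let lastS := (PySem.List.pyGet? item (-1)).getD ""
      let comm_count := PySem.Str.count lastS ","
      if comm_count ≥ 1 then
        let take_base_list := PySem.List.slice item (some 0) (some 5)
        let split_comma := (PySem.Str.split? lastS ",").getD []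
        split_comma.foldl (fun acc2 cell_type =>
          match PySem.Dict.get? (PySem.Dict.mk collapse_dict) cell_type with
          | some grab_new_name => acc2 ++ [take_base_list ++ [grab_new_name]]
          | none => acc2 ++ [take_base_list ++ [cell_type]]) acc
      else
        let cell_type := lastS
        let take_base_list := PySem.List.slice item (some 0) (some 5)
        match PySem.Dict.get? (PySem.Dict.mk collapse_dict) cell_type with
        | some grab_new_name => acc ++ [take_base_list ++ [grab_new_name]]
        | none => acc ++ [take_base_list ++ [cell_type]])
      = (fun acc item => acc ++ pvRows collapse_dict item) := by
    funext acc item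
    exact pv_A_step collapse_dict acc item
  rw [hA, PySem.List.foldl_append_eq_flatMap, List.nil_append]
  -- B's nested loop is a fold of the dedup step over the same flatMap
  have hB : (fun (st : List (List String) × PySem.Set (List String)) (item : List String) =>
      let base := PySem.List.slice item (some 0) (some 5)
      ((PySem.Str.split? ((PySem.List.pyGet? item (-1)).getD "") ",").getD []).foldl
        (fun st2 cell_type =>
          let row := base ++ [(PySem.Dict.get? (PySem.Dict.mk collapse_dict) cell_type).getD cell_type]
          if PySem.Set.contains st2.2 row then st2
          else (st2.1 ++ [row], PySem.Set.add st2.2 row)) st)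
      = (fun st item => (pvRows collapse_dict item).foldl
          (fun (st2 : List (List String) × PySem.Set (List String)) row =>
            if PySem.Set.contains st2.2 row then st2
            else (st2.1 ++ [row], PySem.Set.add st2.2 row)) st) := by
    funext st item
    simp only [pvRows, List.foldl_map]
  rw [hB]
  rw [← List.foldl_flatMap]
  have := pv_fuse (lines_to_split.flatMap (pvRows collapse_dict)) []
  have hempty : (PySem.Set.empty : PySem.Set (List String)) = ([] : List (List String)) := rfl
  rw [hempty, this]
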